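-- pv_equiv track=rewrite | github.com/theara-y/python | 19.2 python data structures/fs_3_three_odd_numbers/three_odd_numbers.py | three_odd_numbers
-- ===== SOURCE A (Python) =====
-- def three_odd_numbers(nums):
--     """Is the sum of any 3 sequential numbers odd?"
--
--         >>> three_odd_numbers([1, 2, 3, 4, 5])
--         True
--
--         >>> three_odd_numbers([0, -2, 4, 1, 9, 12, 4, 1, 0])
--         True
--
--         >>> three_odd_numbers([5, 2, 1])
--         False
--
--         >>> three_odd_numbers([1, 2, 3, 3, 2])
--         False
--     """
--     stringRep = ""
--     for num in nums:
--         if num % 2 == 0: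
--             stringRep += "even"
--         else:
--             stringRep += "odd"
--
--     if "oddoddodd" in stringRep:
--         return True
--     if "evenevenodd" in stringRep:
--         return True
--     if "evenoddeven" in stringRep:
--         return True
--     if "oddeveneven" in stringRep:
--         return True
--     return False
-- ===== SOURCE B (Python) =====
-- def three_odd_numbers(nums):
--     """Is the sum of any 3 sequential numbers odd?"""
--     for a, b, c in zip(nums, nums[1:], nums[2:]):
--         if (a % 2 + b % 2 + c % 2) % 2 == 1:
--             return True
--     return False
-- ===== Notes on version B (the rewrite author's own statement) =====
-- stated objective: simpler
-- what changed: Replaced the parity-string construction plus four substring searches with a single pass over the three-element windows (zip of the list with its two shifts) that returns True as soon as a window's parity sum is odd.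
import Mathlib
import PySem

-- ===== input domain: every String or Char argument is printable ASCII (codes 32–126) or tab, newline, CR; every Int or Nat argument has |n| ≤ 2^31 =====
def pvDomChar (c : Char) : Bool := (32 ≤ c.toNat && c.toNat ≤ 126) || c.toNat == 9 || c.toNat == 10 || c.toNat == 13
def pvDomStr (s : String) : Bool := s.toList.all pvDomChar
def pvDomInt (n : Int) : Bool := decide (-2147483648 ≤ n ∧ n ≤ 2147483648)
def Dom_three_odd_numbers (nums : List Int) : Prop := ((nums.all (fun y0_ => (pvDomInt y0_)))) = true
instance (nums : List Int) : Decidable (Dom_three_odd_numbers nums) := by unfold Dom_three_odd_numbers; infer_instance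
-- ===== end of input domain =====

-- B replaces the parity-string + four substring searches with one pass over the
-- three-element windows (zip with the two shifted lists); objective: simpler.

-- ===== PORT A =====
def three_odd_numbers (nums : List Int) : Bool :=
  let stringRep := nums.foldl
    (fun s num => if PySem.Int.mod num 2 == 0 then s ++ "even" else s ++ "odd") ""
  if PySem.Str.isIn "oddoddodd" stringRep then true
  else if PySem.Str.isIn "evenevenodd" stringRep then true
  else if PySem.Str.isIn "evenoddeven" stringRep then true
  else if PySem.Str.isIn "oddeveneven" stringRep then true
  else false

-- ===== PORT B =====
def three_odd_numbers_alt (nums : List Int) : Bool :=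
  ((nums.zip (nums.drop 1)).zip (nums.drop 2)).any
    (fun p =>
      PySem.Int.mod (PySem.Int.mod p.1.1 2 + PySem.Int.mod p.1.2 2 + PySem.Int.mod p.2 2) 2 == 1)

-- ===== PRECONDITION & SPEC =====
def Spec_three_odd_numbers (nums : List Int) (out : Bool) : Prop := out = three_odd_numbers_alt nums
instance (nums : List Int) (out : Bool) : Decidable (Spec_three_odd_numbers nums out) := by unfold Spec_three_odd_numbers; infer_instance

-- ===== CLAIM (what is proved, stated in full; the proofs are below) =====
def Claim_equal_three_odd_numbers : Prop := ∀ (nums : List Int), Dom_three_odd_numbers nums → Spec_three_odd_numbers nums (three_odd_numbers nums)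

-- ===== LEMMAS AND PROOFS =====

-- parity bit of a number, as A's even/odd test sees it
def pvPbit (n : Int) : Bool := !(PySem.Int.mod n 2 == 0)

-- the token A appends for one number's parity
def pvTok (p : Bool) : List Char := if p then "odd".toList else "even".toList

-- the character list A's stringRep holds, as a function of the parity bits
def pvTokens (ps : List Bool) : List Char := (ps.map pvTok).flatten

-- "some window of three consecutive parity bits has odd parity"
def pvWin : List Bool → Bool
  | [] => false
  | [_] => false
  | [_, _] => false
  | a :: b :: c :: t => (a ^^ (b ^^ c)) || pvWin (b :: c :: t)

lemma pvStringRep_toList (nums : List Int) (s : String) :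
    (nums.foldl
      (fun s num => if PySem.Int.mod num 2 == 0 then s ++ "even" else s ++ "odd") s).toList
    = s.toList ++ pvTokens (nums.map pvPbit) := by
  induction nums generalizing s with
  | nil => simp [pvTokens]
  | cons n t ih =>
    rw [List.foldl_cons]
    have hm : PySem.Int.mod n 2 = n % 2 := PySem.Int.mod_eq_emod_of_pos (by norm_num)
    by_cases h : (PySem.Int.mod n 2 == 0) = true
    · have h' : n % 2 = 0 := by rw [hm] at h; exact eq_of_beq h
      rw [if_pos h, ih]
      simp [pvTokens, pvPbit, pvTok, h']
    · have h' : n % 2 = 1 := by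
        rw [hm] at h
        have := Int.emod_two_eq n
        simp at h
        omega
      rw [if_neg h, ih]
      simp [pvTokens, pvPbit, pvTok, h']

-- Boolean reassociation: interleaved ors regrouped into prefix-ors and tail-ors
lemma pvOrShuffle : ∀ d1 d2 d3 d4 i1 i2 i3 i4 : Bool,
    (d1 || i1 || (d2 || i2) || (d3 || i3) || (d4 || i4))
      = (d1 || d2 || d3 || d4 || (i1 || i2 || i3 || i4)) := by decide

-- any occurrence of one of the four patterns in tok a ++ s is aligned:
-- it is a prefix, or lies in s
lemma pvShift (P : List Char)
    (hP : P = "oddoddodd".toList ∨ P = "evenevenodd".toList ∨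
          P = "evenoddeven".toList ∨ P = "oddeveneven".toList)
    (a : Bool) (s : List Char) :
    PySem.Chars.isIn P (pvTok a ++ s)
      = (decide (P <+: (pvTok a ++ s)) || PySem.Chars.isIn P s) := by
  rw [Bool.eq_iff_iff]
  simp only [Bool.or_eq_true, decide_eq_true_eq]
  constructor
  · intro h
    obtain ⟨j, hj⟩ := (PySem.Chars.exists_prefix_drop_iff_isIn P (pvTok a ++ s)).2 h
    by_cases hj0 : j = 0
    · left; simpa [hj0] using hj
    · by_cases hjl : (pvTok a).length ≤ j
      · right
        rw [List.drop_append, List.drop_eq_nil_of_le hjl, List.nil_append] at hj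
        exact (PySem.Chars.exists_prefix_drop_iff_isIn P s).1 ⟨_, hj⟩
      · exfalso
        have h1 : 1 ≤ j := Nat.one_le_iff_ne_zero.2 hj0
        cases a with
        | false =>
          have h4 : j < 4 := by simpa [pvTok] using Nat.lt_of_not_le hjl
          interval_cases j <;> rcases hP with h' | h' | h' | h' <;> subst h' <;>
            simp [pvTok, List.cons_prefix_cons] at hj
        | true =>
          have h4 : j < 3 := by simpa [pvTok] using Nat.lt_of_not_le hjl
          interval_cases j <;> rcases hP with h' | h' | h' | h' <;> subst h' <;>
            simp [pvTok, List.cons_prefix_cons] at hj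
  · rintro (h | h)
    · exact (PySem.Chars.exists_prefix_drop_iff_isIn P _).1 ⟨0, by simpa using h⟩
    · obtain ⟨j, hj⟩ := (PySem.Chars.exists_prefix_drop_iff_isIn P s).2 h
      refine (PySem.Chars.exists_prefix_drop_iff_isIn P _).1 ⟨(pvTok a).length + j, ?_⟩
      have e : List.drop ((pvTok a).length + j) (pvTok a ++ s) = List.drop j s := by
        rw [List.drop_append, List.drop_eq_nil_of_le (by omega), List.nil_append,
          Nat.add_sub_cancel_left]
      rwa [e]

-- aligned prefix match of the four patterns against three leading tokens
lemma pvFront (a b c : Bool) (r : List Char) :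
    ((decide ("oddoddodd".toList <+: (pvTok a ++ (pvTok b ++ (pvTok c ++ r))))) ||
     (decide ("evenevenodd".toList <+: (pvTok a ++ (pvTok b ++ (pvTok c ++ r))))) ||
     (decide ("evenoddeven".toList <+: (pvTok a ++ (pvTok b ++ (pvTok c ++ r))))) ||
     (decide ("oddeveneven".toList <+: (pvTok a ++ (pvTok b ++ (pvTok c ++ r))))))
    = (a ^^ (b ^^ c)) := by
  cases a <;> cases b <;> cases c <;>
    simp [pvTok, List.cons_prefix_cons]

-- A's four substring tests over the token string compute the window check
set_option maxHeartbeats 1000000 in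
lemma pvMain (ps : List Bool) :
    (PySem.Chars.isIn "oddoddodd".toList (pvTokens ps) ||
     PySem.Chars.isIn "evenevenodd".toList (pvTokens ps) ||
     PySem.Chars.isIn "evenoddeven".toList (pvTokens ps) ||
     PySem.Chars.isIn "oddeveneven".toList (pvTokens ps)) = pvWin ps := by
  induction ps with
  | nil => decide
  | cons a t ih =>
    match t with
    | [] => cases a <;> decide
    | [b] => cases a <;> cases b <;> decide
    | b :: c :: t =>
      have e : pvTokens (a :: b :: c :: t) = pvTok a ++ pvTokens (b :: c :: t) := by
        simp [pvTokens]
      have e2 : pvTokens (b :: c :: t) = pvTok b ++ (pvTok c ++ pvTokens t) := by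
        simp [pvTokens]
      rw [e,
        pvShift _ (Or.inl rfl), pvShift _ (Or.inr (Or.inl rfl)),
        pvShift _ (Or.inr (Or.inr (Or.inl rfl))), pvShift _ (Or.inr (Or.inr (Or.inr rfl)))]
      have hw : pvWin (a :: b :: c :: t) = ((a ^^ (b ^^ c)) || pvWin (b :: c :: t)) := rfl
      rw [hw, ← ih, ← pvFront a b c (pvTokens t), ← e2]
      exact pvOrShuffle _ _ _ _ _ _ _ _

-- B's per-window arithmetic test is the xor of the three parity bits
lemma pvCheck (a b c : Int) :
    (PySem.Int.mod (PySem.Int.mod a 2 + PySem.Int.mod b 2 + PySem.Int.mod c 2) 2 == 1)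
      = (pvPbit a ^^ (pvPbit b ^^ pvPbit c)) := by
  have ha : PySem.Int.mod a 2 = a % 2 := PySem.Int.mod_eq_emod_of_pos (by norm_num)
  have hb : PySem.Int.mod b 2 = b % 2 := PySem.Int.mod_eq_emod_of_pos (by norm_num)
  have hc : PySem.Int.mod c 2 = c % 2 := PySem.Int.mod_eq_emod_of_pos (by norm_num)
  have hm : PySem.Int.mod (a % 2 + b % 2 + c % 2) 2 = (a % 2 + b % 2 + c % 2) % 2 :=
    PySem.Int.mod_eq_emod_of_pos (by norm_num)
  unfold pvPbit
  rw [ha, hb, hc, hm]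
  rcases Int.emod_two_eq a with h1 | h1 <;> rcases Int.emod_two_eq b with h2 | h2 <;>
    rcases Int.emod_two_eq c with h3 | h3 <;> simp [h1, h2, h3]

-- B computes the window check over the parity bits
lemma pvAltEq (nums : List Int) : three_odd_numbers_alt nums = pvWin (nums.map pvPbit) := by
  induction nums with
  | nil => decide
  | cons a t ih =>
    match t with
    | [] => simp [three_odd_numbers_alt, pvWin]
    | [b] => simp [three_odd_numbers_alt, pvWin]
    | b :: c :: t =>
      simp only [three_odd_numbers_alt, List.drop_succ_cons, List.drop_zero,
        List.zip_cons_cons, List.any_cons] at ih ⊢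
      rw [ih, pvCheck, List.map_cons, List.map_cons, List.map_cons]
      rfl

-- ===== VERDICT (by name: the statement is the Claim_ definition above) =====
theorem three_odd_numbers_spec : Claim_equal_three_odd_numbers := by
  intro nums _
  unfold Spec_three_odd_numbers three_odd_numbers
  rw [pvAltEq, ← pvMain (nums.map pvPbit)]
  have hs : (nums.foldl
      (fun s num => if PySem.Int.mod num 2 == 0 then s ++ "even" else s ++ "odd") "").toList
      = pvTokens (nums.map pvPbit) := by
    simpa using pvStringRep_toList nums ""
  simp only [PySem.Str.isIn_eq, hs]
  cases h1 : PySem.Chars.isIn "oddoddodd".toList (pvTokens (nums.map pvPbit)) <;>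
  cases h2 : PySem.Chars.isIn "evenevenodd".toList (pvTokens (nums.map pvPbit)) <;>
  cases h3 : PySem.Chars.isIn "evenoddeven".toList (pvTokens (nums.map pvPbit)) <;>
  cases h4 : PySem.Chars.isIn "oddeveneven".toList (pvTokens (nums.map pvPbit)) <;>
  simp
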